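-- pv_equiv track=rewrite | github.com/Zhu-Justin/ZGEN | dna.py | DNAparser
-- ===== SOURCE A (Python) =====
-- def isDNANucleotide(letter):
--     """Determines if letter is a DNA nucleotide or there's empty space"""
--     if letter == 'A' or letter == 'C' or letter == 'G' or letter == 'T':
--         return True
--     return False
--
-- def DNAparser(text):
--     """Parses text to create valid DNA sequence"""
--     upper_text = text.upper()
--     DNAsequence = ""
--     # Splits text into an array of no whitespace text
--     no_space_text_array = upper_text.split()
--     # Parse through all the text in the text within the array, adding nucleotide letters to DNA sequence
--     for no_space_sequence in no_space_text_array: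
--         for letter in no_space_sequence:
--             if isDNANucleotide(letter):
--                 DNAsequence += letter
--             # If there exists invalid DNA nucleotide, then the text file must not be a DNA sequence
--             if not isDNANucleotide(letter):
--                 return ""
--     # Otherwise return a DNA sequence with no blank spaces
--     return DNAsequence
-- ===== SOURCE B (Python) =====
-- def DNAparser(text):
--     """Parses text to create valid DNA sequence"""
--     chars = [c for c in text.upper() if not c.isspace()]
--     if set(chars) <= set('ACGT'):
--         return ''.join(chars)
--     return ''
-- ===== Notes on version B (the rewrite author's own statement) =====
-- stated objective: alternative
-- what changed: Instead of A's split-into-words and interleaved per-letter build-and-check with early return, B filters whitespace out of the string in one comprehension and decides validity by a set-subset test against the set of the four nucleotide letters, joining the kept characters only when the subset test passes.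
import Mathlib
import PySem

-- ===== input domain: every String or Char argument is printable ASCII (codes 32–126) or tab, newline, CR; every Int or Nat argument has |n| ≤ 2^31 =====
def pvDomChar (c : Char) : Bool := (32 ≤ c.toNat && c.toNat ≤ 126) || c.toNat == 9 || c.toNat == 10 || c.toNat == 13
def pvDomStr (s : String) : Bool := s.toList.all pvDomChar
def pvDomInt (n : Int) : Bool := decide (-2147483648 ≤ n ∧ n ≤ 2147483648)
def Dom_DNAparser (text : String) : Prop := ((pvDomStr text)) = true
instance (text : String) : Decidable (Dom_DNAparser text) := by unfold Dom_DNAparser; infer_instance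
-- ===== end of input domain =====

-- B drops A's split-into-words plus interleaved build-and-check with early return; it filters
-- whitespace out in one comprehension and decides validity by a set-subset test. Alternative decomposition; same cost.

-- ===== PORT A =====
-- isDNANucleotide of A
def pvIsDNA (c : Char) : Bool :=
  if c == 'A' || c == 'C' || c == 'G' || c == 'T' then true else false

-- inner 'for letter in no_space_sequence' loop; none = the early 'return ""'
def pvAInner (acc : List Char) : List Char → Option (List Char)
  | [] => some acc
  | c :: rest =>
      let acc' := if pvIsDNA c then acc ++ [c] else acc
      if !pvIsDNA c then none else pvAInner acc' rest

-- outer 'for no_space_sequence in no_space_text_array' loop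
def pvAOuter (acc : List Char) : List String → String
  | [] => String.ofList acc
  | p :: rest =>
      match pvAInner acc p.toList with
      | none => ""
      | some acc' => pvAOuter acc' rest

def DNAparser (text : String) : String :=
  pvAOuter [] (PySem.Str.split₀ (PySem.Str.upper text))

-- ===== PORT B =====
def DNAparser_alt (text : String) : String :=
  let chars := (PySem.Str.upper text).toList.filter (fun c => !PySem.Chars.isspace c)
  if PySem.Set.issubset (PySem.Set.ofList chars) (PySem.Set.ofList "ACGT".toList) then
    String.ofList chars
  else ""

-- ===== PRECONDITION & SPEC =====
def Spec_DNAparser (text : String) (out : String) : Prop := out = DNAparser_alt text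
instance (text : String) (out : String) : Decidable (Spec_DNAparser text out) := by unfold Spec_DNAparser; infer_instance

-- ===== CLAIM (what is proved, stated in full; the proofs are below) =====
def Claim_equal_DNAparser : Prop := ∀ (text : String), Dom_DNAparser text → Spec_DNAparser text (DNAparser text)

-- ===== LEMMAS AND PROOFS =====
theorem pvIsDNA_eq_mem (c : Char) : pvIsDNA c = decide (c ∈ "ACGT".toList) := by
  simp [pvIsDNA, show "ACGT".toList = ['A','C','G','T'] from rfl]
  by_cases h1 : c = 'A' <;> by_cases h2 : c = 'C' <;> by_cases h3 : c = 'G' <;>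
    by_cases h4 : c = 'T' <;> simp [h1, h2, h3, h4]

theorem pvAInner_eq (cs : List Char) (acc : List Char) :
    pvAInner acc cs = if cs.all pvIsDNA then some (acc ++ cs) else none := by
  induction cs generalizing acc with
  | nil => simp [pvAInner]
  | cons c rest ih =>
      by_cases h : pvIsDNA c = true <;> simp [pvAInner, h, ih]

theorem pvAOuter_eq (ps : List String) (acc : List Char) :
    pvAOuter acc ps =
      if (ps.flatMap String.toList).all pvIsDNA then
        String.ofList (acc ++ ps.flatMap String.toList) else "" := by
  induction ps generalizing acc with
  | nil => simp [pvAOuter]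
  | cons p rest ih =>
      simp only [pvAOuter, pvAInner_eq, List.flatMap_cons, List.all_append]
      by_cases h : p.toList.all pvIsDNA = true <;> simp [h, ih]

-- flatten of split₀'s worker = the non-whitespace characters, in order
theorem split₀_go_flatten (s cur : List Char) (acc : List (List Char)) :
    (PySem.Chars.split₀.go s cur acc).flatten
      = acc.reverse.flatten ++ cur.reverse ++ s.filter (fun c => !PySem.Chars.isspace c) := by
  induction s generalizing cur acc with
  | nil =>
      by_cases h : cur.isEmpty = true <;>
        simp_all [PySem.Chars.split₀.go, List.isEmpty_iff]
  | cons c rest ih =>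
      by_cases hs : PySem.Chars.isspace c = true
      · by_cases h : cur.isEmpty = true <;>
          simp_all [PySem.Chars.split₀.go, List.isEmpty_iff]
      · simp [PySem.Chars.split₀.go, hs, ih]

theorem split₀_flatten (cs : List Char) :
    (PySem.Chars.split₀ cs).flatten = cs.filter (fun c => !PySem.Chars.isspace c) := by
  simpa using split₀_go_flatten cs [] []

theorem all_eq_issubset (l : List Char) :
    l.all pvIsDNA
      = PySem.Set.issubset (PySem.Set.ofList l) (PySem.Set.ofList "ACGT".toList) := by
  by_cases h : l.all pvIsDNA = true
  · rw [h]
    symm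
    rw [PySem.Set.issubset_iff]
    intro x hx
    rw [PySem.Set.mem_ofList] at hx ⊢
    have := List.all_eq_true.mp h x hx
    rw [pvIsDNA_eq_mem] at this
    exact of_decide_eq_true this
  · rw [Bool.eq_false_iff.mpr h]
    symm
    rw [Bool.eq_false_iff]
    intro hsub
    apply h
    rw [List.all_eq_true]
    intro x hx
    rw [pvIsDNA_eq_mem]
    have := (PySem.Set.issubset_iff _ _).mp hsub x ((PySem.Set.mem_ofList _ _).mpr hx)
    exact decide_eq_true ((PySem.Set.mem_ofList _ _).mp this)

-- ===== VERDICT (by name: the statement is the Claim_ definition above) =====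
theorem DNAparser_spec : Claim_equal_DNAparser := by
  intro text _
  unfold Spec_DNAparser DNAparser DNAparser_alt
  have hflat : (PySem.Str.split₀ (PySem.Str.upper text)).flatMap String.toList
      = (PySem.Str.upper text).toList.filter (fun c => !PySem.Chars.isspace c) := by
    rw [List.flatMap_def, PySem.Str.split₀_map_toList, split₀_flatten, PySem.Str.toList_upper]
  rw [pvAOuter_eq]
  simp only [List.nil_append, hflat, all_eq_issubset]
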